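-- pv_equiv track=rewrite | github.com/cmrschwarz/scr | screp.py | parse_prompt_option
-- ===== SOURCE A (Python) =====
-- from typing import Any, Callable, Iterable, Iterator, Optional, TypeVar, BinaryIO, TextIO, Union, cast
--
-- T = TypeVar("T")
--
-- def parse_prompt_option(
--     val: str, options: list[tuple[T, set[str]]],
--     default: Optional[T] = None
-- ) -> Optional[T]:
--     val = val.strip().lower()
--     if val == "":
--         return default
--     for opt, matchings in options:
--         if val in matchings:
--             return opt
--     return None
-- ===== SOURCE B (Python) =====
-- from typing import Optional, TypeVar
--
-- T = TypeVar("T")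
--
-- def parse_prompt_option(val, options, default=None):
--     # Build a first-match-wins index once, then do a single dict lookup.
--     val = val.strip().lower()
--     if val == "":
--         return default
--     index = {}
--     for opt, matchings in options:
--         for s in matchings:
--             if s not in index:
--                 index[s] = opt
--     return index.get(val)
-- ===== Notes on version B (the rewrite author's own statement) =====
-- stated objective: idiomatic
-- what changed: Replaces the per-option linear membership scan with a dict index built once (first-insertion-wins) and a single lookup.
import Mathlib
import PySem

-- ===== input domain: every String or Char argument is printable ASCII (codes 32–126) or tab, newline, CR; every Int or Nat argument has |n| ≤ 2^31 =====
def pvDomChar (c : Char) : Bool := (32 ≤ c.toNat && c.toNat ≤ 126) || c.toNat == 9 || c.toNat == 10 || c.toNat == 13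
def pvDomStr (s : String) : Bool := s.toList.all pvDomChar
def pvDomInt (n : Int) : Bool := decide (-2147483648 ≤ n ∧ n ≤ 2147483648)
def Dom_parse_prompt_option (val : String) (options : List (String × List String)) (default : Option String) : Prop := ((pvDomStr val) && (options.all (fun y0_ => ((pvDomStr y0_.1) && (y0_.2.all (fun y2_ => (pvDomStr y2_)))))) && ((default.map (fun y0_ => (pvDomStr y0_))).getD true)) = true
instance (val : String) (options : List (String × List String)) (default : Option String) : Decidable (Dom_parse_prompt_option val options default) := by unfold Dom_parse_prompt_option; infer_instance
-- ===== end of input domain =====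

-- B builds a first-insertion-wins dict index once and does a single lookup instead of A's per-option membership scan (idiomatic; same cost).

-- ===== PORT A =====
-- the 'for opt, matchings in options' loop with early return
def pvLoopA (v : String) : List (String × List String) → Option String
  | [] => none
  | (opt, matchings) :: rest =>
    if PySem.Set.contains matchings v then some opt else pvLoopA v rest

def parse_prompt_option (val : String) (options : List (String × List String)) (default : Option String) : Option String :=
  let v := PySem.Str.lower (PySem.Str.strip val)
  if v = "" then default
  else pvLoopA v options

-- ===== PORT B =====
-- index = {}; for opt, matchings in options: for s in matchings: if s not in index: index[s] = opt
def pvBuildIdx (options : List (String × List String)) : PySem.Dict String String :=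
  options.foldl
    (fun d p => p.2.foldl (fun d s => if d.contains s then d else d.insert s p.1) d)
    PySem.Dict.empty

def parse_prompt_option_alt (val : String) (options : List (String × List String)) (default : Option String) : Option String :=
  let v := PySem.Str.lower (PySem.Str.strip val)
  if v = "" then default
  else (pvBuildIdx options).get? v

-- ===== PRECONDITION & SPEC =====
def Spec_parse_prompt_option (val : String) (options : List (String × List String)) (default : Option String) (out : Option String) : Prop := out = parse_prompt_option_alt val options default
instance (val : String) (options : List (String × List String)) (default : Option String) (out : Option String) : Decidable (Spec_parse_prompt_option val options default out) := by unfold Spec_parse_prompt_option; infer_instance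

-- ===== CLAIM (what is proved, stated in full; the proofs are below) =====
def Claim_equal_parse_prompt_option : Prop := ∀ (val : String) (options : List (String × List String)) (default : Option String), Dom_parse_prompt_option val options default → Spec_parse_prompt_option val options default (parse_prompt_option val options default)

-- ===== LEMMAS AND PROOFS =====

-- lookup of an absent key yields none
theorem pv_get?_none {d : PySem.Dict String String} {v : String} (h : d.contains v = false) :
    d.get? v = none :=
  (PySem.Dict.get?_eq_none_iff_not_mem_keys d v).mpr
    (fun hm => by rw [(PySem.Dict.contains_iff_mem_keys d v).mpr hm] at h; cases h)

-- inner loop: inserting absent keys from m with value opt; lookup afterwards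
theorem pv_inner_get? (v opt : String) (m : List String) (d : PySem.Dict String String) :
    (m.foldl (fun d s => if d.contains s then d else d.insert s opt) d).get? v
      = if d.contains v then d.get? v
        else if m.contains v then some opt else none := by
  induction m generalizing d with
  | nil =>
    simp
    by_cases h : d.contains v
    · simp [h]
    · simp [h, pv_get?_none ((Bool.not_eq_true _).mp h)]
  | cons s m ih =>
    simp only [List.foldl_cons]
    by_cases hs : d.contains s
    · rw [if_pos hs, ih]
      by_cases hv : d.contains v
      · simp [hv]
      · have hne : v ≠ s := fun e => hv (e ▸ hs)
        simp [hv, List.contains_cons, hne]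
    · rw [if_neg hs, ih]
      by_cases hvs : v = s
      · subst hvs
        simp [PySem.Dict.contains_insert_self, PySem.Dict.get?_insert_self, hs]
      · rw [PySem.Dict.contains_insert, PySem.Dict.get?_insert_of_ne d opt hvs]
        simp [List.contains_cons, hvs, beq_iff_eq]

theorem pv_outer_get? (v : String) (options : List (String × List String)) (d : PySem.Dict String String) :
    (options.foldl
        (fun d p => p.2.foldl (fun d s => if d.contains s then d else d.insert s p.1) d) d).get? v
      = if d.contains v then d.get? v else pvLoopA v options := by
  induction options generalizing d with
  | nil =>
    by_cases h : d.contains v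
    · simp [h, pvLoopA]
    · simp [h, pvLoopA, pv_get?_none ((Bool.not_eq_true _).mp h)]
  | cons p rest ih =>
    simp only [List.foldl_cons]
    rw [ih]
    by_cases hv : d.contains v
    · have : (p.2.foldl (fun d s => if d.contains s then d else d.insert s p.1) d).contains v := by
        rw [PySem.Dict.contains_eq_isSome_get?, pv_inner_get?, if_pos hv,
          ← PySem.Dict.contains_eq_isSome_get?, hv]
      rw [if_pos this, pv_inner_get?, if_pos hv, if_pos hv]
    · by_cases hm : p.2.contains v
      · have : (p.2.foldl (fun d s => if d.contains s then d else d.insert s p.1) d).contains v := by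
          rw [PySem.Dict.contains_eq_isSome_get?, pv_inner_get?, if_neg hv, if_pos hm]; rfl
        rw [if_pos this, pv_inner_get?, if_neg hv, if_pos hm, if_neg hv]
        cases p with
        | mk opt m =>
          simp only [PySem.Set.contains] at hm ⊢
          simp [pvLoopA, PySem.Set.contains] at hm ⊢
          simp [hm]
      · have : ¬ (p.2.foldl (fun d s => if d.contains s then d else d.insert s p.1) d).contains v := by
          rw [PySem.Dict.contains_eq_isSome_get?, pv_inner_get?, if_neg hv, if_neg hm]; simp
        simp only [this, if_neg hv, Bool.false_eq_true, if_false]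
        cases p with
        | mk opt m =>
          simp [pvLoopA, PySem.Set.contains] at hm ⊢
          simp [hm]

-- ===== VERDICT (by name: the statement is the Claim_ definition above) =====
theorem parse_prompt_option_spec : Claim_equal_parse_prompt_option := by
  intro val options default _
  unfold Spec_parse_prompt_option parse_prompt_option parse_prompt_option_alt pvBuildIdx
  by_cases h : PySem.Str.lower (PySem.Str.strip val) = ""
  · simp [h]
  · simp only [h, if_false]
    rw [pv_outer_get?]
    simp [PySem.Dict.empty]
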